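-- pv_equiv track=rewrite | github.com/Sathishr424/LeetcodeProblems | 4039-ComputeDecimalRepresentation/4039-ComputeDecimalRepresentation.py | decimalRepresentation
-- ===== SOURCE A (Python) =====
-- from typing import List
--
-- def decimalRepresentation(n: int) -> List[int]:
--     ret = []
--
--     dig = 1
--     while n:
--         rem = n % 10
--         if rem:
--             ret.append(rem * dig)
--         dig *= 10
--         n //= 10
--
--     return ret[::-1]
-- ===== SOURCE B (Python) =====
-- def decimalRepresentation(n: int):
--     # Idiomatic: walk str(n) most-significant-first, place value from the index.
--     s = str(n)
--     L = len(s)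
--     return [int(d) * 10 ** (L - 1 - i) for i, d in enumerate(s) if d != '0']
-- ===== Notes on version B (the rewrite author's own statement) =====
-- stated objective: idiomatic
-- what changed: B reads str(n) most-significant-first and computes each place value from the string index, replacing A's least-significant mod/floordiv loop with a running multiplier and a final reversal; Pre_ excludes negative n, on which A loops forever.
import Mathlib
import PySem

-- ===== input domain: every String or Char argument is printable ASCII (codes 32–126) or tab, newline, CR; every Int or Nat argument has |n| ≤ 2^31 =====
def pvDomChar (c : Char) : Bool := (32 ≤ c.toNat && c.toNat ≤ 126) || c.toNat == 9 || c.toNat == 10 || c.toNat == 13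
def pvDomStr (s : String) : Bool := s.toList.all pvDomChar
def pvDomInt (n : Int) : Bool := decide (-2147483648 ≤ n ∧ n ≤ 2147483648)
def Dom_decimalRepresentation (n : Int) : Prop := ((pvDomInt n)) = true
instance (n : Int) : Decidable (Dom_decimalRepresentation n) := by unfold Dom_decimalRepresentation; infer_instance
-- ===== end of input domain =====

-- B walks str(n) most-significant-first and derives each place value from the string
-- index, instead of A's least-significant mod/floordiv loop with a running multiplier
-- and a final reversal (objective: idiomatic; same cost).

-- ===== PORT A =====
-- the 'while n' loop of A; fuel n.toNat+1 bounds the number of iterations for n ≥ 0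
def pyLoopA : Nat → Int → Int → List Int → List Int
  | 0, _, _, ret => ret
  | fuel + 1, n, dig, ret =>
    if n = 0 then ret
    else
      let rem := PySem.Int.mod n 10
      let ret' := if rem ≠ 0 then ret ++ [rem * dig] else ret
      pyLoopA fuel (PySem.Int.floordiv n 10) (dig * 10) ret'

def decimalRepresentation (n : Int) : List Int :=
  -- ret[::-1] is List.reverse (PySem.List.slice?_none_none_neg_one)
  (pyLoopA (n.toNat + 1) n 1 []).reverse

-- ===== PORT B =====
-- int(d) for the single digit character d, exact on '0'..'9'
def pyDigitInt (c : Char) : Int := (c.toNat : Int) - 48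

def decimalRepresentation_alt (n : Int) : List Int :=
  let s := (PySem.Int.toStr n).toList
  let L : Int := s.length
  (PySem.List.enumerate s).filterMap (fun p =>
    -- 10 ** (L - 1 - i); the exponent is nonnegative for every index i of s
    if p.2 ≠ '0' then some (pyDigitInt p.2 * 10 ^ (L - 1 - p.1).toNat) else none)

-- ===== PRECONDITION & SPEC =====
-- Pre_ excludes negative n, on which A's 'while n' loop never terminates (n //= 10 stalls at -1).
def Pre_decimalRepresentation (n : Int) : Prop := 0 ≤ n
instance (n : Int) : Decidable (Pre_decimalRepresentation n) := by unfold Pre_decimalRepresentation; infer_instance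
def pvWitness_decimalRepresentation : Int := (105)

def Spec_decimalRepresentation (n : Int) (out : List Int) : Prop := out = decimalRepresentation_alt n
instance (n : Int) (out : List Int) : Decidable (Spec_decimalRepresentation n out) := by unfold Spec_decimalRepresentation; infer_instance

-- ===== CLAIM (what is proved, stated in full; the proofs are below) =====
def Claim_equal_decimalRepresentation : Prop := ∀ (n : Int), Dom_decimalRepresentation n → Pre_decimalRepresentation n → Spec_decimalRepresentation n (decimalRepresentation n)

-- ===== LEMMAS AND PROOFS =====

-- common spec: nonzero digits (LSB-first, starting at place t) times their place values
def specAux : List Nat → Nat → List Int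
  | [], _ => []
  | d :: ds, t => (if (d : Int) ≠ 0 then [(d : Int) * 10 ^ t] else []) ++ specAux ds (t + 1)

theorem pyLoopA_digits (f : Nat) : ∀ (m : Nat), m < f → ∀ (e : Nat) (ret : List Int),
    pyLoopA f (m : Int) ((10 : Int) ^ e) ret = ret ++ specAux (Nat.digits 10 m) e := by
  induction f with
  | zero => intro m hm; omega
  | succ f ih =>
    intro m hm e ret
    by_cases h0 : m = 0
    · subst h0; simp [pyLoopA, specAux]
    · have hm0 : (m : Int) ≠ 0 := by exact_mod_cast h0
      rw [pyLoopA]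
      simp only [hm0, if_false]
      have hmod : PySem.Int.mod (m : Int) 10 = ((m % 10 : Nat) : Int) := by
        exact_mod_cast PySem.Int.mod_natCast m 10
      have hdiv : PySem.Int.floordiv (m : Int) 10 = ((m / 10 : Nat) : Int) := by
        exact_mod_cast PySem.Int.floordiv_natCast m 10
      have hpow : (10 : Int) ^ e * 10 = (10 : Int) ^ (e + 1) := by ring
      rw [hmod, hdiv, hpow, ih (m / 10) (by omega) (e + 1)]
      rw [Nat.digits_def' (by norm_num : 1 < 10) (Nat.pos_of_ne_zero h0)]
      simp only [specAux]
      split_ifs <;> simp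

-- Nat.toDigits is the base-10 digit list, MSB first
theorem toDigitsCore_digits (f : Nat) : ∀ (m : Nat), 0 < m → m < f → ∀ (l : List Char),
    Nat.toDigitsCore 10 f m l = (Nat.digits 10 m).reverse.map Nat.digitChar ++ l := by
  induction f with
  | zero => intro m _ hm; omega
  | succ f ih =>
    intro m hm hmf l
    rw [Nat.toDigitsCore]
    rw [Nat.digits_def' (by norm_num : 1 < 10) hm]
    by_cases hq : m / 10 = 0
    · have : Nat.digits 10 (m / 10) = [] := by rw [hq]; simp
      simp [hq]
    · simp only [hq, if_false]
      rw [ih (m / 10) (Nat.pos_of_ne_zero hq) (by omega)]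
      simp

theorem toDigits_eq (m : Nat) (hm : 0 < m) :
    Nat.toDigits 10 m = (Nat.digits 10 m).reverse.map Nat.digitChar := by
  rw [Nat.toDigits, toDigitsCore_digits (m + 1) m hm (by omega), List.append_nil]

theorem digitChar_ne_zero {d : Nat} (hd : d < 10) : (Nat.digitChar d ≠ '0') ↔ ((d : Int) ≠ 0) := by
  interval_cases d <;> decide

theorem pyDigitInt_digitChar {d : Nat} (hd : d < 10) : pyDigitInt (Nat.digitChar d) = (d : Int) := by
  interval_cases d <;> decide

theorem enumerate_append {α : Type} (xs ys : List α) (s : Int) :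
    PySem.List.enumerate (xs ++ ys) s
      = PySem.List.enumerate xs s ++ PySem.List.enumerate ys (s + xs.length) := by
  induction xs generalizing s with
  | nil => simp [PySem.List.enumerate_nil]
  | cons x xs ih =>
      simp [PySem.List.enumerate_cons, ih, List.length_cons]
      ring_nf

theorem filterB_eq (ds : List Nat) : (∀ d ∈ ds, d < 10) → ∀ (s L : Int) (t : Nat),
    0 ≤ s → L = s + ds.length + t →
    (PySem.List.enumerate (ds.reverse.map Nat.digitChar) s).filterMap (fun p =>
        if p.2 ≠ '0' then some (pyDigitInt p.2 * 10 ^ (L - 1 - p.1).toNat) else none)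
      = (specAux ds t).reverse := by
  induction ds with
  | nil => intro _ s L t _ _; simp [PySem.List.enumerate_nil, specAux]
  | cons d ds ih =>
    intro hlt s L t hs hL
    have hd : d < 10 := hlt d (by simp)
    simp only [List.reverse_cons, List.map_append, List.map_cons, List.map_nil]
    rw [enumerate_append]
    rw [List.filterMap_append]
    rw [ih (fun x hx => hlt x (by simp [hx])) s L (t + 1) hs
        (by simp at hL ⊢; omega)]
    have hidx : s + (ds.reverse.map Nat.digitChar).length = s + ds.length := by simp
    have hexp : (L - 1 - (s + (ds.length : Int))).toNat = t := by
      simp at hL; omega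
    simp only [PySem.List.enumerate_cons, PySem.List.enumerate_nil, List.filterMap_cons,
      List.filterMap_nil, hidx, hexp, specAux, List.reverse_append]
    by_cases hz : Nat.digitChar d ≠ '0'
    · have hdz : d ≠ 0 := by
        have := (digitChar_ne_zero hd).mp hz; exact_mod_cast this
      simp [hz, hdz, pyDigitInt_digitChar hd]
    · have hdz : d = 0 := by
        by_contra hc
        exact hz ((digitChar_ne_zero hd).mpr (by exact_mod_cast hc))
      subst hdz; simp [show Nat.digitChar 0 = '0' from rfl]

-- ===== VERDICT (by name: the statement is the Claim_ definition above) =====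
theorem decimalRepresentation_spec : Claim_equal_decimalRepresentation := by
  intro n _ hpre
  unfold Spec_decimalRepresentation decimalRepresentation decimalRepresentation_alt
  have hn : ((n.toNat : Nat) : Int) = n := Int.toNat_of_nonneg hpre
  by_cases h0 : n = 0
  · subst h0; decide
  · have hm : 0 < n.toNat := by omega
    have hA : pyLoopA (n.toNat + 1) n 1 [] = specAux (Nat.digits 10 n.toNat) 0 := by
      have := pyLoopA_digits (n.toNat + 1) n.toNat (by omega) 0 []
      rw [hn] at this
      simpa using this
    rw [hA]
    have hs : (PySem.Int.toStr n).toList = (Nat.digits 10 n.toNat).reverse.map Nat.digitChar := by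
      rw [PySem.Int.toList_toStr]
      show PySem.Int.toChars n = _
      rw [PySem.Int.toChars]
      rw [if_neg (by omega : ¬ n < 0)]
      exact toDigits_eq n.toNat hm
    rw [hs]
    rw [filterB_eq (Nat.digits 10 n.toNat)
        (fun d hd => Nat.digits_lt_base (by norm_num) hd) 0
        ((Nat.digits 10 n.toNat).reverse.map Nat.digitChar).length 0 (by norm_num)
        (by simp)]
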